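-- pv_equiv track=rewrite | github.com/matthewse19/quantum-simulation | qUtilities.py | missingLeadingRow
-- ===== SOURCE A (Python) =====
-- def missingLeadingRow(arr):
--     width = len(arr[0])
--     one_row = [1,] * width
--
--     copy = list(arr)
--     for row in arr:
--         first_one_index = row.index(1)
--         one_row[first_one_index] = 0
--
--     return one_row
-- ===== SOURCE B (Python) =====
-- def missingLeadingRow(arr):
--     width = len(arr[0])
--     out = []
--     prev = 0
--     for i in sorted({row.index(1) for row in arr}):
--         out.extend([1] * (i - prev))
--         out.append(0)
--         prev = i + 1
--     out.extend([1] * (width - prev))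
--     return out
-- ===== Notes on version B (the rewrite author's own statement) =====
-- stated objective: alternative
-- what changed: A allocates a row of ones and mutates it in place, writing a 0 at each row's leading-one index; B never marks into a preallocated list: it sorts the distinct leading-one columns and assembles the answer as concatenated runs of ones separated by single zeros (sort-then-build by gaps).
import Mathlib
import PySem

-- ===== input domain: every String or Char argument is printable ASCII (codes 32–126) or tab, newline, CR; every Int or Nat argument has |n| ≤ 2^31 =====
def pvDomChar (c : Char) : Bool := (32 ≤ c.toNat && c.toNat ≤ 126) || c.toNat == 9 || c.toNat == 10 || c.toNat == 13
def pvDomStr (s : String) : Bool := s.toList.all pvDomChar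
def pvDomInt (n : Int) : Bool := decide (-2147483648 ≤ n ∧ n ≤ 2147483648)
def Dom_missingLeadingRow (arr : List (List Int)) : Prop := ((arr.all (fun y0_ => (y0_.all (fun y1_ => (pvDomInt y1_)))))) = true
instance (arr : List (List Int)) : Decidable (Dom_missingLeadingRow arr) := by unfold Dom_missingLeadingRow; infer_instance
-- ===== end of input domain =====

-- B replaces A's in-place marking of a preallocated ones-row by sorting the distinct leading-one columns and assembling the output as runs of ones separated by zeros (objective: alternative).


-- ===== PORT A =====
def missingLeadingRow (arr : List (List Int)) : List Int :=
  let width := (arr.headD []).length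
  let one_row := List.replicate width (1 : Int)
  arr.foldl (fun one_row row =>
    match PySem.List.index? row (1 : Int) with
    | some i => PySem.List.pySetD one_row (i : Int) 0
    | none => one_row) one_row

-- ===== PORT B =====
-- row.index(1) raises ValueError on a row without a 1 (the Python then raises; outside Pre_), so the
-- port defaults that unreachable branch with getD 0.
def missingLeadingRow_alt (arr : List (List Int)) : List Int :=
  let width := (arr.headD []).length
  let idxs := PySem.List.sorted
    (PySem.Set.ofList (arr.map (fun row =>
      ((((PySem.List.index? row (1 : Int)).getD 0 : Nat)) : Int)))) (fun x => x) false
  let st := idxs.foldl (fun (st : List Int × Int) i =>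
    (st.1 ++ List.replicate (i - st.2).toNat (1 : Int) ++ [0], i + 1)) ([], 0)
  st.1 ++ List.replicate ((width : Int) - st.2).toNat 1

-- ===== PRECONDITION & SPEC =====
-- Pre_ excludes exactly the inputs on which A raises: the empty list (IndexError on arr[0]),
-- a row without a 1 (ValueError from row.index), and a row whose first 1 is at a column
-- index >= len(arr[0]) (IndexError on the in-place assignment).
def Pre_missingLeadingRow (arr : List (List Int)) : Prop :=
  arr ≠ [] ∧ ∀ row ∈ arr, (1 : Int) ∈ row ∧
    (PySem.List.index? row (1 : Int)).getD 0 < (arr.headD []).length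
instance (arr : List (List Int)) : Decidable (Pre_missingLeadingRow arr) := by
  unfold Pre_missingLeadingRow; infer_instance
def pvWitness_missingLeadingRow : List (List Int) := [[0, 1], [1, 0]]

def Spec_missingLeadingRow (arr : List (List Int)) (out : List Int) : Prop := out = missingLeadingRow_alt arr
instance (arr : List (List Int)) (out : List Int) : Decidable (Spec_missingLeadingRow arr out) := by unfold Spec_missingLeadingRow; infer_instance

-- ===== CLAIM (what is proved, stated in full; the proofs are below) =====
def Claim_equal_missingLeadingRow : Prop := ∀ (arr : List (List Int)), Dom_missingLeadingRow arr → Pre_missingLeadingRow arr → Spec_missingLeadingRow arr (missingLeadingRow arr)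

-- ===== LEMMAS AND PROOFS =====

-- A's loop, elementwise: after folding, position j holds 0 iff some row's first 1 is at j.
theorem foldl_step_getElem? (rows : List (List Int)) (acc : List Int)
    (hrows : ∀ row ∈ rows, (1 : Int) ∈ row ∧
      (PySem.List.index? row (1 : Int)).getD 0 < acc.length) (j : Nat) :
    (rows.foldl (fun one_row row =>
      match PySem.List.index? row (1 : Int) with
      | some i => PySem.List.pySetD one_row (i : Int) 0
      | none => one_row) acc)[j]? =
    if ∃ row ∈ rows, PySem.List.index? row (1 : Int) = some j then some 0 else acc[j]? := by
  induction rows generalizing acc with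
  | nil => simp
  | cons r rs ih =>
    obtain ⟨h1, hlt⟩ := hrows r (by simp)
    obtain ⟨k, hk⟩ := Option.isSome_iff_exists.1
      ((PySem.List.index?_isSome_iff (xs := r) (v := (1:Int))).2 h1)
    rw [hk] at hlt; simp at hlt
    have hset : PySem.List.pySetD acc (k : Int) 0 = acc.set k 0 := by
      unfold PySem.List.pySetD
      rw [PySem.List.pySet?_natCast acc k 0 hlt]
      rfl
    simp only [List.foldl_cons, hk, hset]
    rw [ih]
    · by_cases hrest : ∃ row ∈ rs, PySem.List.index? row (1 : Int) = some j
      · obtain ⟨row, hrow, hidx⟩ := hrest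
        rw [if_pos ⟨row, hrow, hidx⟩, if_pos ⟨row, List.mem_cons_of_mem _ hrow, hidx⟩]
      · rw [if_neg hrest]
        by_cases hj : k = j
        · subst hj
          rw [if_pos ⟨r, List.mem_cons_self, hk⟩, List.getElem?_set_self hlt]
        · have hnone : ¬ ∃ row ∈ r :: rs, PySem.List.index? row (1 : Int) = some j := by
            rintro ⟨row, hrow, hidx⟩
            rcases List.mem_cons.1 hrow with h | h
            · subst h; rw [hk] at hidx
              exact hj (by simpa using hidx)
            · exact hrest ⟨row, h, hidx⟩
          rw [if_neg hnone, List.getElem?_set_ne hj]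
    · intro row hrow
      have := hrows row (List.mem_cons_of_mem _ hrow)
      simpa using this

-- B's loop: folding a strictly increasing list of in-range column indices from a left bound p
-- produces exactly the 0/1 membership picture of the columns p, p+1, …, w-1.
theorem buildRuns (s : List Int) (acc : List Int) (p w : Int)
    (hp : 0 ≤ p)
    (hmem : ∀ i ∈ s, p ≤ i ∧ i < w)
    (hsort : s.Pairwise (· < ·)) :
    (s.foldl (fun (st : List Int × Int) i =>
        (st.1 ++ List.replicate (i - st.2).toNat (1 : Int) ++ [0], i + 1)) (acc, p)).1
      ++ List.replicate (w - (s.foldl (fun (st : List Int × Int) i =>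
        (st.1 ++ List.replicate (i - st.2).toNat (1 : Int) ++ [0], i + 1)) (acc, p)).2).toNat 1
    = acc ++ (List.range' p.toNat (w - p).toNat).map
        (fun (j : Nat) => if ((j : Int) ∈ s) then (0 : Int) else 1) := by
  induction s generalizing acc p with
  | nil =>
    simp [List.map_const', List.length_range']
  | cons i s ih =>
    obtain ⟨hpi, hiw⟩ := hmem i (by simp)
    have hlt : ∀ j ∈ s, i < j := fun j hj => List.rel_of_pairwise_cons hsort hj
    simp only [List.foldl_cons]
    rw [ih (acc ++ List.replicate (i - p).toNat 1 ++ [0]) (i + 1)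
      (by omega)
      (fun j hj => ⟨by have := hlt j hj; omega, (hmem j (List.mem_cons_of_mem _ hj)).2⟩)
      (List.Pairwise.of_cons hsort)]
    -- split range' p.toNat (w-p).toNat into [p,i), {i}, [i+1,w)
    have hsplit : List.range' p.toNat (w - p).toNat =
        List.range' p.toNat (i - p).toNat ++ i.toNat :: List.range' (i.toNat + 1) (w - (i + 1)).toNat := by
      have h1 : p.toNat + 1 * (i - p).toNat = i.toNat := by omega
      have h2 : (w - p).toNat = (i - p).toNat + ((w - (i + 1)).toNat + 1) := by omega
      rw [h2, ← List.range'_append (s := p.toNat) (m := (i - p).toNat)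
        (n := (w - (i + 1)).toNat + 1) (step := 1), h1, List.range'_succ]
    rw [hsplit, List.map_append, List.map_cons]
    have hhead : (if ((i.toNat : Int) ∈ i :: s) then (0 : Int) else 1) = 0 := by
      rw [if_pos]
      rw [show ((i.toNat : Int)) = i by omega]
      exact List.mem_cons_self
    have hpre : (List.range' p.toNat (i - p).toNat).map
        (fun (j : Nat) => if ((j : Int) ∈ i :: s) then (0 : Int) else 1) =
        List.replicate (i - p).toNat (1 : Int) := by
      rw [List.map_congr_left (g := fun _ => (1 : Int)) ?_, List.map_const', List.length_range']
      intro j hj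
      obtain ⟨k, hk, rfl⟩ := List.mem_range'.1 hj
      rw [if_neg]
      simp only [List.mem_cons, not_or]
      constructor
      · omega
      · intro hmem'
        have := hlt _ hmem'
        omega
    have htail : (List.range' (i.toNat + 1) (w - (i + 1)).toNat).map
        (fun (j : Nat) => if ((j : Int) ∈ i :: s) then (0 : Int) else 1) =
        (List.range' (i.toNat + 1) (w - (i + 1)).toNat).map
        (fun (j : Nat) => if ((j : Int) ∈ s) then (0 : Int) else 1) := by
      apply List.map_congr_left
      intro j hj
      obtain ⟨k, hk, rfl⟩ := List.mem_range'.1 hj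
      apply if_congr _ rfl rfl
      simp only [List.mem_cons]
      constructor
      · rintro (h | h)
        · omega
        · exact h
      · exact Or.inr
    rw [hhead, hpre, htail]
    have : (i + 1).toNat = i.toNat + 1 := by omega
    rw [this]
    simp [List.append_assoc]

theorem missingLeadingRow_spec : Claim_equal_missingLeadingRow := by
  intro arr _hdom hpre
  obtain ⟨hne, hrows⟩ := hpre
  unfold Spec_missingLeadingRow
  -- names for the two sides' ingredients
  set width := (arr.headD []).length with hwidth
  set s := PySem.List.sorted
    (PySem.Set.ofList (arr.map (fun row =>
      ((((PySem.List.index? row (1 : Int)).getD 0 : Nat)) : Int)))) (fun x => x) false with hs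
  -- membership in s is "some row's first 1 is at this column"
  have hmem_iff : ∀ j : Nat, ((j : Int) ∈ s) ↔
      ∃ row ∈ arr, PySem.List.index? row (1 : Int) = some j := by
    intro j
    rw [hs, PySem.List.mem_sorted, PySem.Set.mem_ofList, List.mem_map]
    constructor
    · rintro ⟨row, hrow, hcast⟩
      obtain ⟨k, hk⟩ := Option.isSome_iff_exists.1
        ((PySem.List.index?_isSome_iff (xs := row) (v := (1:Int))).2 (hrows row hrow).1)
      rw [hk] at hcast
      simp only [Option.getD_some] at hcast
      have : k = j := by exact_mod_cast hcast
      exact ⟨row, hrow, by rw [hk, this]⟩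
    · rintro ⟨row, hrow, hk⟩
      exact ⟨row, hrow, by rw [hk]; rfl⟩
  -- every element of s is a column index in [0, width)
  have hbounds : ∀ i ∈ s, (0 : Int) ≤ i ∧ i < (width : Int) := by
    intro i hi
    rw [hs, PySem.List.mem_sorted, PySem.Set.mem_ofList, List.mem_map] at hi
    obtain ⟨row, hrow, rfl⟩ := hi
    refine ⟨by positivity, ?_⟩
    have := (hrows row hrow).2
    omega
  have hsort : s.Pairwise (· < ·) := by
    rw [hs]
    exact PySem.List.sorted_ofList_pairwise_lt _
  -- A's side as a map over the column range
  have hA : missingLeadingRow arr =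
      (List.range width).map (fun j =>
        if ∃ row ∈ arr, PySem.List.index? row (1 : Int) = some j then (0 : Int) else 1) := by
    apply List.ext_getElem?
    intro j
    show (arr.foldl _ (List.replicate width (1 : Int)))[j]? = _
    rw [foldl_step_getElem? arr (List.replicate width 1)
      (by intro row hrow; simpa using hrows row hrow) j, List.getElem?_map]
    have hidx : ∀ row : List Int, PySem.List.index? row (1 : Int) = List.idxOf? 1 row :=
      fun row => PySem.List.index?_eq_idxOf? row 1
    by_cases hex : ∃ row ∈ arr, PySem.List.index? row (1 : Int) = some j
    · have hjlt : j < width := by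
        obtain ⟨row, hrow, hk⟩ := hex
        have := (hrows row hrow).2
        rw [hk] at this
        simpa using this
      rw [if_pos hex, List.getElem?_range hjlt]
      have hex' := hex
      simp only [hidx] at hex'
      simp [hex']
    · rw [if_neg hex]
      by_cases hjlt : j < width
      · rw [List.getElem?_range hjlt]
        have hex' := hex
        simp only [hidx] at hex'
        simp [hex', hjlt]
      · rw [List.getElem?_eq_none (l := List.range width) (by simpa using hjlt),
          List.getElem?_eq_none (by simpa using hjlt)]
        rfl
  -- B's side by the run-construction lemma, then pointwise agreement of the two maps
  have hB : missingLeadingRow_alt arr =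
      (List.range' (0 : Int).toNat ((width : Int) - 0).toNat).map
        (fun (j : Nat) => if ((j : Int) ∈ s) then (0 : Int) else 1) :=
    buildRuns s [] 0 (width : Int) le_rfl
      (fun i hi => ⟨(hbounds i hi).1, (hbounds i hi).2⟩) hsort
  rw [hA, hB]
  have : List.range' (0 : Int).toNat ((width : Int) - 0).toNat = List.range width := by
    rw [List.range_eq_range']
    norm_num
  rw [this]
  apply List.map_congr_left
  intro j _
  exact if_congr (hmem_iff j).symm rfl rfl
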